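-- pv_equiv track=rewrite | github.com/TrueMS/genetic-codon | AlnView.py | get_variable_positions
-- ===== SOURCE A (Python) =====
-- def get_variable_positions(sequences):
--     """Get positions with variations"""
--     seq_list = list(sequences.values())
--     alignment_length = len(seq_list[0])
--     variable_positions = []
--
--     for i in range(alignment_length):
--         column = [seq[i] for seq in seq_list]
--         if len(set(column)) > 1:
--             variable_positions.append(i)
--
--     return variable_positions
-- ===== SOURCE B (Python) =====
-- def get_variable_positions(sequences):
--     """Get positions with variations"""
--     seq_list = list(sequences.values())
--     ref = seq_list[0]
--     alignment_length = len(ref)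
--     variable = set()
--     for seq in seq_list:
--         for i in range(alignment_length):
--             if seq[i] != ref[i]:
--                 variable.add(i)
--     return sorted(variable)
-- ===== Notes on version B (the rewrite author's own statement) =====
-- stated objective: alternative
-- what changed: Swapped the loop nesting: instead of building a set per alignment column (positions outer, sequences inner), B fixes the first sequence as reference, scans each sequence over all positions accumulating one set of indices where it differs from the reference, and returns the sorted set.
import Mathlib
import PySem

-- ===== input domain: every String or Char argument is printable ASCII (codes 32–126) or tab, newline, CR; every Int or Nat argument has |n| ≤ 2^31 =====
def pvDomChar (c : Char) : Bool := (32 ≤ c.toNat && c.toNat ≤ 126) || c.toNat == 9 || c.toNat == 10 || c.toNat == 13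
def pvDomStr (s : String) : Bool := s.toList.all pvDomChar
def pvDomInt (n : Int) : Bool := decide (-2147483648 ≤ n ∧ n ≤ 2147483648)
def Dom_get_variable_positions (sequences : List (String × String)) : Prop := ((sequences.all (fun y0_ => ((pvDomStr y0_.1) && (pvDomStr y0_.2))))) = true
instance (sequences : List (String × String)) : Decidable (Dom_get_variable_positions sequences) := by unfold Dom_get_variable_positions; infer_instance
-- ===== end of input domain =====

-- B swaps the loop nesting (sequences outer, positions inner) and accumulates one set of
-- variable indices against the first sequence instead of building a set per column; objective: alternative.

-- ===== PORT A =====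
def get_variable_positions (sequences : List (String × String)) : List Int :=
  let seq_list := (PySem.Dict.ofList sequences).values
  match PySem.List.pyGet? seq_list 0 with
  | none => []  -- seq_list[0] raises IndexError on an empty dict (excluded by Pre_)
  | some first =>
    (PySem.List.pyRange 0 (PySem.Str.len first) 1).foldl
      (fun acc i =>
        if 1 < PySem.Set.len
            (PySem.Set.ofList (seq_list.map (fun seq => PySem.Str.pyGet? seq i)))
        then acc ++ [i] else acc) []

-- ===== PORT B =====
def get_variable_positions_alt (sequences : List (String × String)) : List Int :=
  let seq_list := (PySem.Dict.ofList sequences).values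
  match PySem.List.pyGet? seq_list 0 with
  | none => []  -- seq_list[0] raises IndexError on an empty dict (excluded by Pre_)
  | some ref =>
    let variable_ : PySem.Set Int := seq_list.foldl
      (fun s seq =>
        (PySem.List.pyRange 0 (PySem.Str.len ref) 1).foldl
          (fun s i =>
            if PySem.Str.pyGet? seq i ≠ PySem.Str.pyGet? ref i then PySem.Set.add s i else s)
          s)
      PySem.Set.empty
    PySem.List.sorted variable_ (fun x => x)

-- ===== PRECONDITION & SPEC =====
-- Pre_ excludes exactly the inputs where the Python A raises IndexError: an empty dict
-- (seq_list[0]) or a dict with some value shorter than the first value (seq[i] in the column).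
def Pre_get_variable_positions (sequences : List (String × String)) : Prop :=
  (PySem.Dict.ofList sequences).values ≠ [] ∧
  ∀ s ∈ (PySem.Dict.ofList sequences).values,
    PySem.Str.len ((PySem.Dict.ofList sequences).values.headI) ≤ PySem.Str.len s
instance (sequences : List (String × String)) : Decidable (Pre_get_variable_positions sequences) := by
  unfold Pre_get_variable_positions; infer_instance
def pvWitness_get_variable_positions : (List (String × String)) := [("a", "AC"), ("b", "AG")]
def Spec_get_variable_positions (sequences : List (String × String)) (out : List Int) : Prop := out = get_variable_positions_alt sequences
instance (sequences : List (String × String)) (out : List Int) : Decidable (Spec_get_variable_positions sequences out) := by unfold Spec_get_variable_positions; infer_instance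

-- ===== CLAIM (what is proved, stated in full; the proofs are below) =====
def Claim_equal_get_variable_positions : Prop := ∀ (sequences : List (String × String)), Dom_get_variable_positions sequences → Pre_get_variable_positions sequences → Spec_get_variable_positions sequences (get_variable_positions sequences)

-- ===== LEMMAS AND PROOFS =====

-- membership in B's inner loop (one sequence, all positions)
lemma pv_mem_inner (ref seq : String) (rng : List Int) (s : PySem.Set Int) (x : Int) :
    x ∈ rng.foldl
      (fun s i =>
        if PySem.Str.pyGet? seq i ≠ PySem.Str.pyGet? ref i then PySem.Set.add s i else s) s
    ↔ x ∈ s ∨ (x ∈ rng ∧ PySem.Str.pyGet? seq x ≠ PySem.Str.pyGet? ref x) := by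
  induction rng generalizing s with
  | nil => simp
  | cons a t ih =>
    simp only [List.foldl_cons]
    rw [ih]
    by_cases h : PySem.Str.pyGet? seq a ≠ PySem.Str.pyGet? ref a
    · simp only [if_pos h, PySem.Set.mem_add, List.mem_cons]
      constructor
      · rintro ((hs | rfl) | ⟨ht, hp⟩)
        · exact Or.inl hs
        · exact Or.inr ⟨Or.inl rfl, h⟩
        · exact Or.inr ⟨Or.inr ht, hp⟩
      · rintro (hs | ⟨(rfl | ht), hp⟩)
        · exact Or.inl (Or.inl hs)
        · exact Or.inl (Or.inr rfl)
        · exact Or.inr ⟨ht, hp⟩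
    · simp only [if_neg h, List.mem_cons]
      push Not at h
      constructor
      · rintro (hs | ⟨ht, hp⟩)
        · exact Or.inl hs
        · exact Or.inr ⟨Or.inr ht, hp⟩
      · rintro (hs | ⟨(rfl | ht), hp⟩)
        · exact Or.inl hs
        · exact absurd h hp
        · exact Or.inr ⟨ht, hp⟩

-- B's inner loop preserves Nodup
lemma pv_nodup_inner (ref seq : String) (rng : List Int) (s : PySem.Set Int)
    (hs : List.Nodup s) :
    List.Nodup (rng.foldl
      (fun s i =>
        if PySem.Str.pyGet? seq i ≠ PySem.Str.pyGet? ref i then PySem.Set.add s i else s) s) := by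
  induction rng generalizing s with
  | nil => exact hs
  | cons a t ih =>
    simp only [List.foldl_cons]
    split
    · exact ih _ (PySem.Set.nodup_add _ _ hs)
    · exact ih _ hs

-- membership in B's outer loop (all sequences)
lemma pv_mem_outer (ref : String) (l : List String) (rng : List Int) (s : PySem.Set Int) (x : Int) :
    x ∈ l.foldl
      (fun s seq => rng.foldl
        (fun s i =>
          if PySem.Str.pyGet? seq i ≠ PySem.Str.pyGet? ref i then PySem.Set.add s i else s) s) s
    ↔ x ∈ s ∨ ∃ seq ∈ l, x ∈ rng ∧ PySem.Str.pyGet? seq x ≠ PySem.Str.pyGet? ref x := by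
  induction l generalizing s with
  | nil => simp
  | cons b l ih =>
    simp only [List.foldl_cons]
    rw [ih, pv_mem_inner]
    constructor
    · rintro ((hs | hb) | ⟨seq, hseq, hq⟩)
      · exact Or.inl hs
      · exact Or.inr ⟨b, by simp, hb⟩
      · exact Or.inr ⟨seq, by simp [hseq], hq⟩
    · rintro (hs | ⟨seq, hseq, hq⟩)
      · exact Or.inl (Or.inl hs)
      · rcases List.mem_cons.1 hseq with rfl | hseq'
        · exact Or.inl (Or.inr hq)
        · exact Or.inr ⟨seq, hseq', hq⟩

-- B's outer loop preserves Nodup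
lemma pv_nodup_outer (ref : String) (l : List String) (rng : List Int) (s : PySem.Set Int)
    (hs : List.Nodup s) :
    List.Nodup (l.foldl
      (fun s seq => rng.foldl
        (fun s i =>
          if PySem.Str.pyGet? seq i ≠ PySem.Str.pyGet? ref i then PySem.Set.add s i else s) s) s) := by
  induction l generalizing s with
  | nil => exact hs
  | cons b l ih => exact ih _ (pv_nodup_inner _ _ _ _ hs)

-- a list with two distinct members has length > 1
lemma pv_one_lt_length_of_mem_ne {α : Type} {l : List α} {x y : α}
    (hx : x ∈ l) (hy : y ∈ l) (hne : x ≠ y) : 1 < l.length := by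
  cases l with
  | nil => simp at hx
  | cons a t =>
    cases t with
    | nil =>
      simp only [List.mem_singleton] at hx hy
      exact absurd (hx.trans hy.symm) hne
    | cons b u => simp only [List.length_cons]; omega

-- a Nodup list whose members are all equal has length ≤ 1
lemma pv_length_le_one_of_nodup_all_eq {α : Type} {l : List α} {a : α}
    (hn : List.Nodup l) (h : ∀ z ∈ l, z = a) : l.length ≤ 1 := by
  cases l with
  | nil => simp
  | cons b t =>
    cases t with
    | nil => simp
    | cons c u =>
      exfalso
      have hb : b = a := h b (by simp)
      have hc : c = a := h c (by simp)
      rw [List.nodup_cons] at hn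
      subst hb; subst hc
      exact hn.1 (List.mem_cons_self ..)

-- a column headed by the reference character varies iff some other entry differs from it
lemma pv_one_lt_set_cons {α : Type} [BEq α] [LawfulBEq α] (a : α) (l : List α) :
    1 < (PySem.Set.ofList (a :: l)).length ↔ ∃ y ∈ l, y ≠ a := by
  constructor
  · intro h
    by_contra hall
    push Not at hall
    have hle : (PySem.Set.ofList (a :: l)).length ≤ 1 := by
      refine pv_length_le_one_of_nodup_all_eq (a := a) (PySem.Set.nodup_ofList _) (fun z hz => ?_)
      rcases List.mem_cons.1 ((PySem.Set.mem_ofList _ _).1 hz) with rfl | hz'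
      · rfl
      · exact hall z hz'
    omega
  · rintro ⟨y, hy, hne⟩
    exact pv_one_lt_length_of_mem_ne
      ((PySem.Set.mem_ofList _ _).2 (List.mem_cons_self ..))
      ((PySem.Set.mem_ofList _ _).2 (List.mem_cons_of_mem _ hy)) (Ne.symm hne)

-- ===== VERDICT (by name: the statement is the Claim_ definition above) =====
theorem get_variable_positions_spec : Claim_equal_get_variable_positions := by
  intro sequences _hdom _hpre
  unfold Spec_get_variable_positions get_variable_positions get_variable_positions_alt
  cases hvs : (PySem.Dict.ofList sequences).values with
  | nil => rfl
  | cons r t =>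
    have hget : PySem.List.pyGet? (r :: t) 0 = some r := by
      simp [PySem.List.pyGet?, PySem.List.pyIdx?]
    simp only [hget]
    -- name the range and the per-position variation predicate
    have hlen : PySem.Str.len r = (r.toList.length : Int) := PySem.Str.len_eq r
    set rng : List Int := PySem.List.pyRange 0 (PySem.Str.len r) 1 with hrng
    -- A's loop is a filter of the range
    have hA := PySem.List.foldl_append_if
      (fun i => decide (1 < PySem.Set.len
        (PySem.Set.ofList ((r :: t).map (fun seq => PySem.Str.pyGet? seq i)))))
      id rng []
    simp only [decide_eq_true_eq, List.map_id, List.nil_append, id] at hA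
    rw [hA]
    -- B's set, characterised
    set var : PySem.Set Int := (r :: t).foldl
      (fun s seq => rng.foldl
        (fun s i =>
          if PySem.Str.pyGet? seq i ≠ PySem.Str.pyGet? r i then PySem.Set.add s i else s) s)
      PySem.Set.empty with hvar
    have hnodup_var : List.Nodup var := pv_nodup_outer _ _ _ _ (by simp [PySem.Set.empty])
    have hmem_var : ∀ x, x ∈ var ↔
        x ∈ rng ∧ ∃ seq ∈ t, PySem.Str.pyGet? seq x ≠ PySem.Str.pyGet? r x := by
      intro x
      rw [hvar, pv_mem_outer]
      simp only [PySem.Set.empty, List.not_mem_nil, false_or]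
      constructor
      · rintro ⟨seq, hseq, hx, hq⟩
        rcases List.mem_cons.1 hseq with rfl | hseq'
        · exact absurd rfl hq
        · exact ⟨hx, seq, hseq', hq⟩
      · rintro ⟨hx, seq, hseq, hq⟩
        exact ⟨seq, List.mem_cons_of_mem _ hseq, hx, hq⟩
    -- the filtered range, characterised
    set q : Int → Bool := fun i => decide (1 < PySem.Set.len
      (PySem.Set.ofList ((r :: t).map (fun seq => PySem.Str.pyGet? seq i)))) with hq
    have hrng_eq : rng = (List.range r.toList.length).map (fun k : Nat => (k : Int)) := by
      rw [hrng, hlen]; exact PySem.List.pyRange_zero_natCast _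
    have hnodup_rng : List.Nodup rng := by
      rw [hrng_eq]
      exact List.Nodup.map (fun a b h => by exact_mod_cast h) List.nodup_range
    have hpair_rng : List.Pairwise (· < ·) rng := by
      rw [hrng_eq]
      exact List.pairwise_map.2 (List.pairwise_lt_range.imp (fun h => by exact_mod_cast h))
    have hmem_filter : ∀ x, x ∈ rng.filter q ↔
        x ∈ rng ∧ ∃ seq ∈ t, PySem.Str.pyGet? seq x ≠ PySem.Str.pyGet? r x := by
      intro x
      rw [List.mem_filter]
      refine and_congr_right fun _ => ?_
      rw [hq]
      simp only [decide_eq_true_eq, PySem.Set.len, List.map_cons]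
      rw [Nat.one_lt_cast, pv_one_lt_set_cons]
      constructor
      · rintro ⟨y, hy, hne⟩
        rcases List.mem_map.1 hy with ⟨seq, hseq, rfl⟩
        exact ⟨seq, hseq, hne⟩
      · rintro ⟨seq, hseq, hne⟩
        exact ⟨_, List.mem_map_of_mem hseq, hne⟩
    -- conclude: B's sorted set is exactly A's filtered range
    refine (PySem.List.sorted_eq_of_perm_of_pairwise_lt var (rng.filter q) (fun x => x) ?_ ?_).symm
    · refine (List.perm_ext_iff_of_nodup (List.Nodup.filter _ hnodup_rng) hnodup_var).2 fun x => ?_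
      rw [hmem_filter, hmem_var]
    · exact List.Pairwise.filter _ hpair_rng
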